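-- pv_equiv track=rewrite | github.com/xiaobenbenecho/TimeSeriesPredict | ProjectData_Sell_Through/func_MTM.py | MTM_window
-- ===== SOURCE A (Python) =====
-- def MTM_window(seq, n = 20):
--     from itertools import islice
--     "Returns a sliding window (of width n) over data from the iterable"
--     "   s -> (s0,s1,...s[n-1]), (s1,s2,...,sn), ...                   "
--     it = iter(seq)
--     result = tuple(islice(it, n))
--     if len(result) == n:
--         yield result
--     for elem in it:
--         result = result[1:] + (elem,)
--         yield result
-- ===== SOURCE B (Python) =====
-- def MTM_window(seq, n=20):
--     from itertools import islice, tee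
--     seq = list(seq)
--     if n <= len(seq):  # otherwise no window of width n fits: yield nothing
--         yield from zip(*(islice(it, i, None) for i, it in enumerate(tee(seq, n))))
-- ===== Notes on version B (the rewrite author's own statement) =====
-- stated objective: idiomatic
-- what changed: B yields the windows by zipping n offset iterators (itertools.tee + islice) instead of maintaining and sliding a rolling tuple result[1:]+(elem,) element by element.
-- intended difference: For n == 0 A yields an empty tuple followed by a width-1 singleton per element (leftover loop state, not width-0 windows), while B yields nothing, the natural reading that there are no width-0 windows. — e.g. on MTM_window([1, 2], 0): A returns [[], [1], [2]], B returns []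
import Mathlib
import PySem

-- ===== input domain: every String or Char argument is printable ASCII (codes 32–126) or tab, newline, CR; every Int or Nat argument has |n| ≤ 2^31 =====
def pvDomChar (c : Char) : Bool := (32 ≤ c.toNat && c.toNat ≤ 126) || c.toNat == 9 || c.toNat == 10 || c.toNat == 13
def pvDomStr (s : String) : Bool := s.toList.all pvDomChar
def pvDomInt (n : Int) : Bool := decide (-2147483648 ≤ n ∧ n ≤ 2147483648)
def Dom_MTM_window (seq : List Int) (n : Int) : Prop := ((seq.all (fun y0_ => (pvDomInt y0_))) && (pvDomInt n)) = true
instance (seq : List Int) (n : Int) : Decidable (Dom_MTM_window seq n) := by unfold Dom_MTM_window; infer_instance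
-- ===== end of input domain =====

-- B builds each window by zipping n offset copies of the sequence (itertools.tee + islice)
-- instead of A's rolling tuple update; return-value equivalence for n ≥ 1, intended difference at n = 0.


-- ===== PORT A =====
-- A: take the first n elements as the initial window, yield it if full,
-- then slide it over the rest one element at a time.
def MTM_window (seq : List Int) (n : Int) : List (List Int) :=
  let k := n.toNat
  let result := seq.take k
  let it := seq.drop k
  let acc := if (result.length : Int) = n then [result] else []
  (it.foldl (fun st elem =>
      (st.1.drop 1 ++ [elem], st.2 ++ [st.1.drop 1 ++ [elem]])) (result, acc)).2

-- ===== PORT B =====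
-- Python's zip(*iters) over a list of lists (stdlib call, ported as a fuel recursion:
-- fuel = length of the first list bounds the number of rows zip can emit).
def pyZipGo (fuel : Nat) (ls : List (List Int)) : List (List Int) :=
  match fuel with
  | 0 => []
  | fuel + 1 =>
    if ls.any List.isEmpty then []
    else ls.map List.headI :: pyZipGo fuel (ls.map List.tail)

def pyZip (ls : List (List Int)) : List (List Int) :=
  match ls with
  | [] => []
  | l0 :: _ => pyZipGo l0.length ls

-- B: if no width-n window fits, nothing; else zip of the n iterators tee(seq, n),
-- the i-th advanced by i (islice(it, i, None) = drop i).
def MTM_window_alt (seq : List Int) (n : Int) : List (List Int) :=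
  if (seq.length : Int) < n then []
  else pyZip ((List.range n.toNat).map (fun i => seq.drop i))

-- ===== PRECONDITION & SPEC =====
-- A raises ValueError for n < 0 (islice rejects a negative stop); so does B (tee).
def Pre_MTM_window (seq : List Int) (n : Int) : Prop := 0 <= n
instance (seq : List Int) (n : Int) : Decidable (Pre_MTM_window seq n) := by unfold Pre_MTM_window; infer_instance
def pvWitness_MTM_window : List Int × Int := ([1, 2, 3], 2)

-- For n == 0 A yields an empty tuple followed by a width-1 singleton per element (leftover loop
-- state, not width-0 windows), while B yields nothing -- the natural reading that there are no
-- width-0 windows.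
def D_MTM_window (seq : List Int) (n : Int) : Prop := n = 0
instance (seq : List Int) (n : Int) : Decidable (D_MTM_window seq n) := by unfold D_MTM_window; infer_instance

def Spec_MTM_window (seq : List Int) (n : Int) (out : List (List Int)) : Prop :=
  ¬ D_MTM_window seq n → out = MTM_window_alt seq n
instance (seq : List Int) (n : Int) (out : List (List Int)) : Decidable (Spec_MTM_window seq n out) := by unfold Spec_MTM_window; infer_instance

def pvDiffWitness_MTM_window : List Int × Int := ([1, 2], 0)
def pvDiffWitnessOut_MTM_window : (List (List Int)) × (List (List Int)) := ([[], [1], [2]], [])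

-- ===== CLAIM (what is proved, stated in full; the proofs are below) =====
def Claim_unchanged_MTM_window : Prop := ∀ (seq : List Int) (n : Int), Dom_MTM_window seq n → Pre_MTM_window seq n → Spec_MTM_window seq n (MTM_window seq n)
def Claim_changed_MTM_window : Prop := Dom_MTM_window (pvDiffWitness_MTM_window.1) (pvDiffWitness_MTM_window.2) ∧ Pre_MTM_window (pvDiffWitness_MTM_window.1) (pvDiffWitness_MTM_window.2) ∧ D_MTM_window (pvDiffWitness_MTM_window.1) (pvDiffWitness_MTM_window.2) ∧ MTM_window (pvDiffWitness_MTM_window.1) (pvDiffWitness_MTM_window.2) = pvDiffWitnessOut_MTM_window.1 ∧ MTM_window_alt (pvDiffWitness_MTM_window.1) (pvDiffWitness_MTM_window.2) = pvDiffWitnessOut_MTM_window.2 ∧ pvDiffWitnessOut_MTM_window.1 ≠ pvDiffWitnessOut_MTM_window.2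
def Claim_exact_MTM_window : Prop := ∀ (seq : List Int) (n : Int), Dom_MTM_window seq n → Pre_MTM_window seq n → D_MTM_window seq n → MTM_window seq n ≠ MTM_window_alt seq n

-- ===== LEMMAS AND PROOFS =====

-- canonical sliding-window list: all contiguous sublists of length k (for k >= 1)
def W (k : Nat) : List Int → List (List Int)
  | [] => []
  | a :: l => if (a :: l).length < k then [] else (a :: l).take k :: W k l

-- the fold's accumulator is a pure prefix
theorem foldA_acc (it : List Int) (w : List Int) (acc : List (List Int)) :
    (it.foldl (fun st elem =>
        (st.1.drop 1 ++ [elem], st.2 ++ [st.1.drop 1 ++ [elem]])) (w, acc)).2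
    = acc ++ (it.foldl (fun st elem =>
        (st.1.drop 1 ++ [elem], st.2 ++ [st.1.drop 1 ++ [elem]])) (w, [])).2 := by
  induction it generalizing w acc with
  | nil => simp
  | cons e it ih =>
    simp only [List.foldl_cons]
    conv_lhs => rw [ih]
    conv_rhs => rw [ih]
    simp

theorem drop_eq_cons (l : List Int) (k : Nat) (h : k < l.length) :
    l.drop k = l[k] :: l.drop (k + 1) := by
  exact List.drop_eq_getElem_cons h

theorem slide_window (l : List Int) (k : Nat) (hk : 1 ≤ k) (h : k < l.length) :
    (l.take k).drop 1 ++ [l[k]] = l.tail.take k := by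
  have h1 : (l.take k).drop 1 = (l.drop 1).take (k - 1) := by
    rw [List.drop_take]
  have h2 : l.tail.take k = l.tail.take (k - 1) ++ (l.tail[k-1]?).toList := by
    rw [← List.take_succ]
    congr 1
    omega
  have h3 : l.tail[k-1]? = some l[k] := by
    rw [List.getElem?_tail]
    rw [show k - 1 + 1 = k from by omega]
    exact List.getElem?_eq_getElem h
  rw [h1, h2, h3, ← List.drop_one]
  simp

theorem foldA_W (k : Nat) (hk : 1 ≤ k) :
    ∀ (l : List Int), k ≤ l.length →
    ((l.drop k).foldl (fun st elem =>
        (st.1.drop 1 ++ [elem], st.2 ++ [st.1.drop 1 ++ [elem]])) (l.take k, ([] : List (List Int)))).2 = W k l.tail := by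
  intro l
  induction l with
  | nil => intro h; simp at h; omega
  | cons a t ih =>
    intro hlen
    rcases Nat.lt_or_ge k (a :: t).length with h | h
    · -- more than k elements: one step, then recurse on the tail t
      rw [drop_eq_cons (a :: t) k h]
      simp only [List.foldl_cons]
      have hslide : ((a :: t).take k).drop 1 ++ [(a :: t)[k]] = t.take k := by
        have := slide_window (a :: t) k hk h
        simpa using this
      have hdrop : (a :: t).drop (k + 1) = t.drop k := by simp
      simp only [hslide, hdrop]
      rw [foldA_acc]
      have hlt : k ≤ t.length := by simp at h; omega
      rw [ih hlt]
      simp only [List.tail_cons]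
      cases t with
      | nil => simp at hlt; omega
      | cons b t' =>
        have hnl : ¬ ((b :: t').length < k) := by simp at hlt ⊢; omega
        simp only [W, if_neg hnl]
        simp
    · -- exactly k elements: nothing left to fold, tail has no full window
      have hlen' : (a :: t).length = k := by omega
      have hnil : (a :: t).drop k = [] := by simp [hlen']
      rw [hnil]
      simp only [List.foldl_nil, List.tail_cons]
      cases t with
      | nil => simp [W]
      | cons b t' =>
        have hlt2 : (b :: t').length < k := by simp at hlen' ⊢; omega
        simp only [W, if_pos hlt2]

theorem A_eq_W (seq : List Int) (n : Int) (hn : 1 ≤ n) :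
    MTM_window seq n = W n.toNat seq := by
  unfold MTM_window
  set k := n.toNat with hk
  have hk1 : 1 ≤ k := by omega
  rcases Nat.lt_or_ge seq.length k with h | h
  · -- short sequence: no full window
    have h2 : seq.drop k = [] := by simp; omega
    have hne : ¬ ((seq.take k).length : Int) = n := by
      simp [List.length_take]; omega
    simp only [h2, List.foldl_nil, if_neg hne]
    cases seq with
    | nil => simp [W]
    | cons a t =>
      simp only [W, if_pos h]
  · have heq : ((seq.take k).length : Int) = n := by
      simp [List.length_take]; omega
    simp only [if_pos heq]
    rw [foldA_acc, foldA_W k hk1 seq h]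
    cases seq with
    | nil => simp at h; omega
    | cons a t =>
      have hnl : ¬ ((a :: t).length < k) := by omega
      simp only [W, if_neg hnl]
      simp

-- B-side: headI of each offset copy gives the first window
theorem map_headI_drop (l : List Int) (k : Nat) (h : k ≤ l.length) :
    (List.range k).map (fun i => (l.drop i).headI) = l.take k := by
  apply List.ext_getElem
  · simp; omega
  · intro i h1 h2
    simp only [List.getElem_map, List.getElem_range, List.getElem_take]
    have hi : i < l.length := by simp at h1; omega
    rw [drop_eq_cons l i hi]
    rfl

theorem any_isEmpty_drop (l : List Int) (k : Nat) (hk : 1 ≤ k) :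
    ((List.range k).map (fun i => l.drop i)).any List.isEmpty = true ↔ l.length < k := by
  simp only [List.any_map, List.any_eq_true, List.mem_range, Function.comp]
  constructor
  · rintro ⟨i, hik, hie⟩
    have hnil : l.drop i = [] := by simpa [List.isEmpty_iff] using hie
    have := List.drop_eq_nil_iff.mp hnil
    omega
  · intro h
    exact ⟨l.length, h, by simp⟩

theorem zipGo_W (k : Nat) (hk : 1 ≤ k) :
    ∀ (l : List Int) (fuel : Nat), l.length ≤ fuel →
    pyZipGo fuel ((List.range k).map (fun i => l.drop i)) = W k l := by
  intro l
  induction l with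
  | nil =>
    intro fuel _
    have hempty : ((List.range k).map (fun i => ([] : List Int).drop i)).any List.isEmpty = true := by
      rw [any_isEmpty_drop _ k hk]; simpa using hk
    cases fuel with
    | zero => simp [pyZipGo, W]
    | succ m => simp only [pyZipGo, hempty, if_true, W]
  | cons a t ih =>
    intro fuel hfuel
    cases fuel with
    | zero => simp at hfuel
    | succ m =>
      rcases Nat.lt_or_ge (a :: t).length k with hlt | hge
      · have hempty := (any_isEmpty_drop (a :: t) k hk).mpr hlt
        simp only [pyZipGo, hempty, if_true, W, if_pos hlt]
      · have hnot : ¬ (((List.range k).map (fun i => (a :: t).drop i)).any List.isEmpty = true) := by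
          rw [any_isEmpty_drop _ k hk]; omega
        simp only [pyZipGo, if_neg hnot]
        have hhead : ((List.range k).map (fun i => (a :: t).drop i)).map List.headI
            = (a :: t).take k := by
          rw [List.map_map]
          exact map_headI_drop (a :: t) k hge
        have htails : ((List.range k).map (fun i => (a :: t).drop i)).map List.tail
            = (List.range k).map (fun i => t.drop i) := by
          rw [List.map_map]
          apply List.map_congr_left
          intro i _
          simp [List.tail_drop]
        rw [hhead, htails, ih m (by simp at hfuel; omega)]
        have hnl : ¬ ((a :: t).length < k) := by omega
        simp only [W, if_neg hnl]

theorem B_eq_W (seq : List Int) (n : Int) (hn : 1 ≤ n) :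
    MTM_window_alt seq n = W n.toNat seq := by
  have hk1 : 1 ≤ n.toNat := by omega
  unfold MTM_window_alt
  rcases lt_or_ge (seq.length : Int) n with hshort | hfit
  · -- no window fits: both sides empty
    rw [if_pos hshort]
    cases seq with
    | nil => simp [W]
    | cons a t =>
      have hlt : (a :: t).length < n.toNat := by simp at hshort ⊢; omega
      simp only [W, if_pos hlt]
  rw [if_neg (by omega)]
  set k := n.toNat with hk
  have hcons : (List.range k).map (fun i => seq.drop i)
      = seq :: (List.range' 1 (k - 1)).map (fun i => seq.drop i) := by
    have hr : List.range k = 0 :: List.range' 1 (k - 1) := by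
      obtain ⟨m, hm⟩ : ∃ m, k = m + 1 := ⟨k - 1, by omega⟩
      rw [hm, List.range_eq_range', List.range'_succ]
      simp
    rw [hr]; simp
  rw [hcons]
  show pyZipGo seq.length (seq :: (List.range' 1 (k - 1)).map (fun i => seq.drop i)) = W k seq
  rw [← hcons]
  exact zipGo_W k hk1 seq seq.length (le_refl _)

-- at n = 0, A's output begins with the empty window, hence is never []
theorem A_zero_ne_nil (seq : List Int) : MTM_window seq 0 ≠ [] := by
  unfold MTM_window
  simp only [Int.toNat_zero, List.take_zero, List.drop_zero, List.length_nil]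
  rw [foldA_acc]
  simp

-- ===== VERDICT (by name: the statement is the Claim_ definition above) =====
theorem MTM_window_spec : Claim_unchanged_MTM_window := by
  intro seq n _ hpre hD
  unfold D_MTM_window at hD
  have hn : 1 ≤ n := by
    unfold Pre_MTM_window at hpre
    omega
  rw [A_eq_W seq n hn, B_eq_W seq n hn]

theorem MTM_window_changed : Claim_changed_MTM_window := by unfold Claim_changed_MTM_window; decide

theorem MTM_window_tight : Claim_exact_MTM_window := by
  intro seq n _ _ hD
  have h0 : n = 0 := hD
  subst h0
  intro heq
  have hB : MTM_window_alt seq 0 = [] := by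
    unfold MTM_window_alt pyZip
    split <;> simp
  exact A_zero_ne_nil seq (heq.trans hB)
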